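-- pv_equiv track=rewrite | github.com/Burburton/amazing-async-dev | runtime/plan_aware_agent.py | get_decision_safe_alternatives
-- ===== SOURCE A (Python) =====
-- from typing import Any
--
-- def get_decision_safe_alternatives(
--     decision_constraints: dict[str, Any],
--     task_queue: list[str],
-- ) -> list[str]:
--     """Get alternative tasks that can proceed despite blocking decisions.
--
--     Args:
--         decision_constraints: Decision constraints from analyze_decision_constraints()
--         task_queue: Current task queue
--
--     Returns:
--         Tasks that are safe to execute despite decisions
--     """
--     blocking_decisions = decision_constraints.get("blocking_decisions", [])
--
--     if not blocking_decisions: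
--         return task_queue
--
--     # If decisions block main tasks, look for parallel work
--     # Simple heuristic: tasks not directly related to decision topic
--     safe_tasks = []
--
--     blocked_topics = []
--     for d in blocking_decisions:
--         decision_text = d.get("decision", "").lower()
--         # Extract topic keywords
--         blocked_topics.extend(decision_text.split()[:3])
--
--     for task in task_queue:
--         task_lower = task.lower()
--         is_safe = True
--
--         for topic in blocked_topics:
--             if topic in task_lower:
--                 is_safe = False
--                 break
--
--         if is_safe:
--             safe_tasks.append(task)
--
--     return safe_tasks
-- ===== SOURCE B (Python) =====
-- def get_decision_safe_alternatives(decision_constraints, task_queue):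
--     # Sieve: for each topic, filter the surviving queue once (topics outer, tasks inner).
--     remaining = task_queue
--     for d in decision_constraints.get("blocking_decisions", []):
--         for topic in d.get("decision", "").lower().split()[:3]:
--             remaining = [t for t in remaining if topic not in t.lower()]
--     return remaining
-- ===== Notes on version B (the rewrite author's own statement) =====
-- stated objective: alternative
-- what changed: Inverts the loop nesting: instead of collecting a blocked_topics list and scanning it per task with an is_safe flag and break, B never builds that list and instead sieves the queue, filtering the surviving tasks once per topic (topics outer, tasks inner), with no early-return branch.
import Mathlib
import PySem

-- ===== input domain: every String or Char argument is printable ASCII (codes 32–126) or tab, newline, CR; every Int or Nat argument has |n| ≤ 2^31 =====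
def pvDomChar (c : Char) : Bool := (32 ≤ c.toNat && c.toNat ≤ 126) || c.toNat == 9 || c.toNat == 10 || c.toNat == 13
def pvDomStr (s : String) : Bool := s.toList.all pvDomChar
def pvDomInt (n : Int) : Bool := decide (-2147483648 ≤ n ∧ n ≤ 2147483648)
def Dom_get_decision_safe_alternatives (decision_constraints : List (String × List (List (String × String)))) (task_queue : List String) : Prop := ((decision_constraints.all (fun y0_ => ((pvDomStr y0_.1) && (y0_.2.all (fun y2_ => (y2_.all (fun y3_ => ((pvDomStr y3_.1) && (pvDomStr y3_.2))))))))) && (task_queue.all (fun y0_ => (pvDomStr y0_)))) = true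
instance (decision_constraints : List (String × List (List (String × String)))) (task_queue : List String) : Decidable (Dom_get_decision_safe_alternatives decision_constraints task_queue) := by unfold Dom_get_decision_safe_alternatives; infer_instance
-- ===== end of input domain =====

-- B sieves the queue topic by topic (topics outer, tasks inner, no blocked_topics list,
-- no early return) instead of A's per-task scan over a collected topic list; same values.

-- ===== PORT A =====
-- 'for topic in blocked_topics: if topic in task_lower: is_safe = False; break'
def pyAIsSafe (topics : List String) (task_lower : String) : Bool :=
  match topics with
  | [] => true
  | t :: rest => if PySem.Str.isIn t task_lower then false else pyAIsSafe rest task_lower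

def get_decision_safe_alternatives (decision_constraints : List (String × List (List (String × String)))) (task_queue : List String) : List String :=
  let blocking_decisions := (PySem.Dict.mk decision_constraints).getD "blocking_decisions" []
  if blocking_decisions = [] then task_queue
  else
    let blocked_topics := blocking_decisions.foldl (fun acc d =>
      acc ++ ((PySem.Str.split₀ (PySem.Str.lower ((PySem.Dict.mk d).getD "decision" ""))).take 3)) []
    task_queue.foldl (fun safe_tasks task =>
      if pyAIsSafe blocked_topics (PySem.Str.lower task) then safe_tasks ++ [task] else safe_tasks) []

-- ===== PORT B =====
def get_decision_safe_alternatives_alt (decision_constraints : List (String × List (List (String × String)))) (task_queue : List String) : List String :=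
  ((PySem.Dict.mk decision_constraints).getD "blocking_decisions" []).foldl (fun remaining d =>
    (((PySem.Str.split₀ (PySem.Str.lower ((PySem.Dict.mk d).getD "decision" ""))).take 3).foldl
      (fun rem topic => rem.filter (fun t => !(PySem.Str.isIn topic (PySem.Str.lower t)))) remaining)) task_queue

-- ===== PRECONDITION & SPEC =====
def Spec_get_decision_safe_alternatives (decision_constraints : List (String × List (List (String × String)))) (task_queue : List String) (out : List String) : Prop := out = get_decision_safe_alternatives_alt decision_constraints task_queue
instance (decision_constraints : List (String × List (List (String × String)))) (task_queue : List String) (out : List String) : Decidable (Spec_get_decision_safe_alternatives decision_constraints task_queue out) := by unfold Spec_get_decision_safe_alternatives; infer_instance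

-- ===== CLAIM (what is proved, stated in full; the proofs are below) =====
def Claim_equal_get_decision_safe_alternatives : Prop := ∀ (decision_constraints : List (String × List (List (String × String)))) (task_queue : List String), Dom_get_decision_safe_alternatives decision_constraints task_queue → Spec_get_decision_safe_alternatives decision_constraints task_queue (get_decision_safe_alternatives decision_constraints task_queue)

-- ===== LEMMAS AND PROOFS =====
theorem pyAIsSafe_eq_all (topics : List String) (tl : String) :
    pyAIsSafe topics tl = topics.all (fun t => !(PySem.Str.isIn t tl)) := by
  induction topics with
  | nil => rfl
  | cons t rest ih => simp [pyAIsSafe, List.all_cons, ih]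

-- successive one-topic filters = one filter by the conjunction of all topics
theorem sieve_eq_filter (topics : List String) (xs : List String) :
    topics.foldl (fun rem topic => rem.filter (fun t => !(PySem.Str.isIn topic (PySem.Str.lower t)))) xs
      = xs.filter (fun t => topics.all (fun topic => !(PySem.Str.isIn topic (PySem.Str.lower t)))) := by
  induction topics generalizing xs with
  | nil => simp
  | cons p rest ih =>
    simp only [List.foldl_cons, ih, List.filter_filter, List.all_cons]
    apply List.filter_congr
    intro t _
    simp [Bool.and_comm]

-- B's nested fold = single sieve over the flatMap of the topics
theorem alt_eq_sieve (dc : List (String × List (List (String × String)))) (tq : List String) :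
    get_decision_safe_alternatives_alt dc tq
      = (((PySem.Dict.mk dc).getD "blocking_decisions" []).flatMap
          (fun d => (PySem.Str.split₀ (PySem.Str.lower ((PySem.Dict.mk d).getD "decision" ""))).take 3)).foldl
          (fun rem topic => rem.filter (fun t => !(PySem.Str.isIn topic (PySem.Str.lower t)))) tq := by
  unfold get_decision_safe_alternatives_alt
  generalize ((PySem.Dict.mk dc).getD "blocking_decisions" []) = bd
  induction bd generalizing tq with
  | nil => simp
  | cons d rest ih =>
    simp only [List.foldl_cons, List.flatMap_cons, List.foldl_append]
    exact ih _

theorem get_decision_safe_alternatives_spec : Claim_equal_get_decision_safe_alternatives := by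
  intro dc tq _
  show get_decision_safe_alternatives dc tq = get_decision_safe_alternatives_alt dc tq
  rw [alt_eq_sieve, sieve_eq_filter]
  unfold get_decision_safe_alternatives
  set bd := (PySem.Dict.mk dc).getD "blocking_decisions" [] with hbd
  by_cases h : bd = []
  · simp [h]
  · simp only [h, if_false]
    simp only [PySem.List.foldl_append_eq_flatMap, List.nil_append]
    rw [PySem.List.foldl_append_if_eq_filter, List.nil_append]
    apply List.filter_congr
    intro task _
    exact pyAIsSafe_eq_all _ (PySem.Str.lower task)
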